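-- pv_equiv track=rewrite | github.com/sibarras/snakeProject | 2ndTry.py | makeParts
-- ===== SOURCE A (Python) =====
-- def makeParts(snakemouth=tuple, snakebody=list) -> list:
--     lastPoint = snakemouth
--     bodyparts = [[]]
--     partNumber = 0
--     if snakebody[1][0] == lastPoint[0]:
--         axis = 'X'
--     elif snakebody[1][1] == lastPoint[1]:
--         axis = 'Y'
--     for point in snakebody:
--         if point[0] == lastPoint[0] and axis == 'X':
--             bodyparts[partNumber].append(point)
--         elif point[1] == lastPoint[1] and axis == 'Y':
--             bodyparts[partNumber].append(point)
--         else: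
--             partNumber += 1
--             bodyparts.append([])
--             bodyparts[partNumber].append(point)
--             if axis == 'Y': axis = 'X'
--             elif axis == 'X': axis = 'Y'
--         lastPoint = point
--     return bodyparts
-- ===== SOURCE B (Python) =====
-- def makeParts(snakemouth=tuple, snakebody=list) -> list:
--     # initial axis from snakebody[1] vs snakemouth, exactly as the original determines it
--     if snakebody[1][0] == snakemouth[0]:
--         axis = 0
--     elif snakebody[1][1] == snakemouth[1]:
--         axis = 1
--     n = len(snakebody)
--     # first run: maximal prefix sharing snakemouth's coordinate on the start axis
--     j = 0
--     while j < n and snakebody[j][axis] == snakemouth[axis]: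
--         j += 1
--     parts = [snakebody[0:j]]
--     i = j
--     while i < n:
--         axis = 1 - axis
--         c = snakebody[i][axis]
--         j = i + 1
--         while j < n and snakebody[j][axis] == c:
--             j += 1
--         parts.append(snakebody[i:j])
--         i = j
--     return parts
-- ===== Notes on version B (the rewrite author's own statement) =====
-- stated objective: alternative
-- what changed: Instead of A's per-point loop that appends each point into a mutable nested list while flipping an axis flag, B detects each maximal straight run at once (all points of a run share one coordinate), using an index scan to find the run's end and slicing the body between run boundaries.
import Mathlib
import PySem

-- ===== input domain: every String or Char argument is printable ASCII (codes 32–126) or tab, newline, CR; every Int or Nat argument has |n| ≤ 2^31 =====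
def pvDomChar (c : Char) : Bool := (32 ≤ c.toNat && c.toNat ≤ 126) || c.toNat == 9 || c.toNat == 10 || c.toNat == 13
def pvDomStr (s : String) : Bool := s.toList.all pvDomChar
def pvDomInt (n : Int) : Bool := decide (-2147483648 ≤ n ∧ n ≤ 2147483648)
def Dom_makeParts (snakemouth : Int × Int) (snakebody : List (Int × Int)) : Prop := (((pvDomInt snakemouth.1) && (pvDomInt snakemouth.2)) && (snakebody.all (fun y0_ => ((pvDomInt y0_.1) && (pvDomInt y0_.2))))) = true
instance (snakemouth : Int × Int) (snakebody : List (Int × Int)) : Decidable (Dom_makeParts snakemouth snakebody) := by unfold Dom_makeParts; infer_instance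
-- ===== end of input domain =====

-- B replaces A's per-point append/flip loop by maximal-run detection with index scans and slicing
-- between run boundaries (a different decomposition of the same segmentation; same return value).


-- ===== PORT A =====
-- the for loop of A over (bodyparts, partNumber, axis, lastPoint); axis true = 'X', false = 'Y'
def makePartsLoop (parts : List (List (Int × Int))) (pn : Nat) (axis : Bool) (last : Int × Int) : List (Int × Int) → List (List (Int × Int))
  | [] => parts
  | p :: ps =>
    if p.1 = last.1 ∧ axis = true then
      makePartsLoop (parts.set pn (parts.getD pn [] ++ [p])) pn axis p ps
    else if p.2 = last.2 ∧ axis = false then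
      makePartsLoop (parts.set pn (parts.getD pn [] ++ [p])) pn axis p ps
    else
      makePartsLoop (parts ++ [[p]]) (pn + 1) (!axis) p ps

def makeParts (snakemouth : Int × Int) (snakebody : List (Int × Int)) : List (List (Int × Int)) :=
  match PySem.List.pyGet? snakebody 1 with
  | none => []  -- snakebody[1] raises IndexError (outside Pre_)
  | some p1 =>
    if p1.1 = snakemouth.1 then makePartsLoop [[]] 0 true snakemouth snakebody
    else if p1.2 = snakemouth.2 then makePartsLoop [[]] 0 false snakemouth snakebody
    else []  -- 'axis' stays unbound and the first loop iteration raises NameError (outside Pre_)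

-- ===== PORT B =====
-- p[axis] with axis 0 encoded as true, axis 1 as false
def pvProj (axis : Bool) (p : Int × Int) : Int := if axis then p.1 else p.2

-- the inner while loop: first index j' ≥ j with j' = n or snakebody[j'][axis] ≠ c
def pvRunEnd (body : List (Int × Int)) (axis : Bool) (c : Int) (j : Nat) : Nat :=
  if h : j < body.length then
    if pvProj axis body[j] = c then pvRunEnd body axis c (j + 1) else j
  else j
termination_by body.length - j

-- needed by pvOuter's termination
theorem pvRunEnd_ge (body : List (Int × Int)) (axis : Bool) (c : Int) : ∀ j, j ≤ pvRunEnd body axis c j := by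
  intro j
  induction hk : body.length - j using Nat.strong_induction_on generalizing j with
  | _ k ih =>
    rw [pvRunEnd]
    split
    · split
      · have h1 : j + 1 ≤ pvRunEnd body axis c (j + 1) := ih (body.length - (j + 1)) (by omega) (j + 1) rfl
        omega
      · exact le_rfl
    · exact le_rfl

-- the outer while loop: flip axis, scan the run starting at i, slice it off, continue at its end
def pvOuter (body : List (Int × Int)) (axis : Bool) (i : Nat) : List (List (Int × Int)) :=
  if h : i < body.length then
    PySem.List.slice body (some (i : Int)) (some ((pvRunEnd body (!axis) (pvProj (!axis) body[i]) (i + 1) : Nat) : Int))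
      :: pvOuter body (!axis) (pvRunEnd body (!axis) (pvProj (!axis) body[i]) (i + 1))
  else []
termination_by body.length - i
decreasing_by have := pvRunEnd_ge body (!axis) (pvProj (!axis) body[i]) (i + 1); omega

-- the run-scanning body of B once the initial axis is known
def pvScan (body : List (Int × Int)) (axis : Bool) (m : Int × Int) : List (List (Int × Int)) :=
  PySem.List.slice body (some 0) (some ((pvRunEnd body axis (pvProj axis m) 0 : Nat) : Int))
    :: pvOuter body axis (pvRunEnd body axis (pvProj axis m) 0)

def makeParts_alt (snakemouth : Int × Int) (snakebody : List (Int × Int)) : List (List (Int × Int)) :=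
  match PySem.List.pyGet? snakebody 1 with
  | none => []  -- snakebody[1] raises IndexError (outside Pre_)
  | some p1 =>
    if p1.1 = snakemouth.1 then pvScan snakebody true snakemouth
    else if p1.2 = snakemouth.2 then pvScan snakebody false snakemouth
    else []  -- 'axis' stays unbound and the first while test raises NameError (outside Pre_)

-- ===== PRECONDITION & SPEC =====
-- Pre_ excludes exactly the inputs where A raises: bodies shorter than 2 (IndexError on snakebody[1])
-- and bodies whose second point shares no coordinate with snakemouth ('axis' unbound → NameError).
def Pre_makeParts (snakemouth : Int × Int) (snakebody : List (Int × Int)) : Prop :=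
  2 ≤ snakebody.length ∧
    ((snakebody.getD 1 (0, 0)).1 = snakemouth.1 ∨ (snakebody.getD 1 (0, 0)).2 = snakemouth.2)
instance (snakemouth : Int × Int) (snakebody : List (Int × Int)) : Decidable (Pre_makeParts snakemouth snakebody) := by unfold Pre_makeParts; infer_instance

def pvWitness_makeParts : (Int × Int) × (List (Int × Int)) := ((0, 0), [(0, 1), (0, 2)])

def Spec_makeParts (snakemouth : Int × Int) (snakebody : List (Int × Int)) (out : List (List (Int × Int))) : Prop := out = makeParts_alt snakemouth snakebody
instance (snakemouth : Int × Int) (snakebody : List (Int × Int)) (out : List (List (Int × Int))) : Decidable (Spec_makeParts snakemouth snakebody out) := by unfold Spec_makeParts; infer_instance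

-- ===== CLAIM (what is proved, stated in full; the proofs are below) =====
def Claim_equal_makeParts : Prop := ∀ (snakemouth : Int × Int) (snakebody : List (Int × Int)), Dom_makeParts snakemouth snakebody → Pre_makeParts snakemouth snakebody → Spec_makeParts snakemouth snakebody (makeParts snakemouth snakebody)

-- ===== LEMMAS AND PROOFS =====

-- middleman: the segmentation both programs compute, as a structural recursion
def pvConsume (cur : List (Int × Int)) (axis : Bool) (last : Int × Int) : List (Int × Int) → List (List (Int × Int))
  | [] => [cur]
  | p :: ps =>
    if pvProj axis p = pvProj axis last then pvConsume (cur ++ [p]) axis p ps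
    else cur :: pvConsume [p] (!axis) p ps

theorem set_append_singleton (parts : List (List (Int × Int))) (cur x : List (Int × Int)) :
    (parts ++ [cur]).set parts.length x = parts ++ [x] := by
  induction parts with
  | nil => rfl
  | cons a t ih => simp [List.set, ih]

theorem getD_append_singleton (parts : List (List (Int × Int))) (cur : List (Int × Int)) :
    (parts ++ [cur]).getD parts.length [] = cur := by
  induction parts with
  | nil => rfl
  | cons a t ih => simpa using ih

theorem loop_eq_consume : ∀ (body : List (Int × Int)) (parts : List (List (Int × Int))) (cur : List (Int × Int)) (axis : Bool) (last : Int × Int),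
    makePartsLoop (parts ++ [cur]) parts.length axis last body = parts ++ pvConsume cur axis last body := by
  intro body
  induction body with
  | nil => intro parts cur axis last; simp [makePartsLoop, pvConsume]
  | cons p ps ih =>
    intro parts cur axis last
    cases axis with
    | true =>
      by_cases h : p.1 = last.1
      · have h2 := ih parts (cur ++ [p]) true p
        simp [makePartsLoop, pvConsume, pvProj, h, set_append_singleton, getD_append_singleton, h2]
      · have h2 := ih (parts ++ [cur]) [p] false p
        simp only [makePartsLoop, pvConsume, pvProj, h, if_true, if_false, and_true, and_false,
          if_pos, if_neg, Bool.not_true, ite_true, ite_false, false_and, if_neg h]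
        rw [show parts.length + 1 = (parts ++ [cur]).length by simp]
        simp only [Bool.not_true] at h2 ⊢
        rw [h2]
        simp [h]
    | false =>
      by_cases h : p.2 = last.2
      · have h2 := ih parts (cur ++ [p]) false p
        simp [makePartsLoop, pvConsume, pvProj, h, set_append_singleton, getD_append_singleton, h2]
      · have h2 := ih (parts ++ [cur]) [p] true p
        simp only [makePartsLoop, pvConsume, pvProj, h, if_true, if_false, and_true, and_false,
          false_and, ite_true, ite_false, Bool.not_false, if_neg h]
        rw [show parts.length + 1 = (parts ++ [cur]).length by simp]
        simp only [Bool.not_false] at h2 ⊢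
        rw [h2]
        simp [h]

-- the tail of the segmentation after the current run
def pvTailC (axis : Bool) : List (Int × Int) → List (List (Int × Int))
  | [] => []
  | q :: qs => pvConsume [q] (!axis) q qs

theorem consume_run : ∀ (suf : List (Int × Int)) (cur : List (Int × Int)) (axis : Bool) (last : Int × Int),
    pvConsume cur axis last suf =
      (cur ++ suf.takeWhile (fun p => decide (pvProj axis p = pvProj axis last)))
        :: pvTailC axis (suf.dropWhile (fun p => decide (pvProj axis p = pvProj axis last))) := by
  intro suf
  induction suf with
  | nil => intro cur axis last; simp [pvConsume, pvTailC]
  | cons p ps ih =>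
    intro cur axis last
    by_cases h : pvProj axis p = pvProj axis last
    · simp only [pvConsume, if_pos h, List.takeWhile_cons, List.dropWhile_cons, h, decide_true,
        if_true]
      rw [ih (cur ++ [p]) axis p]
      simp [h]
    · simp only [pvConsume, if_neg h, List.takeWhile_cons, List.dropWhile_cons, h, decide_false,
        if_false]
      simp [pvTailC]

theorem takeWhile_length_le (l : List (Int × Int)) (p : Int × Int → Bool) :
    (l.takeWhile p).length ≤ l.length := by
  induction l with
  | nil => simp
  | cons a t ih =>
    cases hp : p a
    · simp [List.takeWhile_cons, hp]
    · simp only [List.takeWhile_cons, hp, if_true, List.length_cons]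
      omega

theorem take_takeWhile_length (l : List (Int × Int)) (p : Int × Int → Bool) :
    l.take (l.takeWhile p).length = l.takeWhile p := by
  induction l with
  | nil => simp
  | cons a t ih =>
    cases hp : p a
    · simp [List.takeWhile_cons, hp]
    · simp [List.takeWhile_cons, hp, ih]

theorem drop_takeWhile_length (l : List (Int × Int)) (p : Int × Int → Bool) :
    l.drop (l.takeWhile p).length = l.dropWhile p := by
  induction l with
  | nil => simp
  | cons a t ih =>
    cases hp : p a
    · simp [List.takeWhile_cons, List.dropWhile_cons, hp]
    · simp [List.takeWhile_cons, List.dropWhile_cons, hp, ih]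

theorem runEnd_eq (body : List (Int × Int)) (axis : Bool) (c : Int) :
    ∀ j, j ≤ body.length →
      pvRunEnd body axis c j = j + ((body.drop j).takeWhile (fun p => decide (pvProj axis p = c))).length := by
  intro j
  induction hk : body.length - j using Nat.strong_induction_on generalizing j with
  | _ k ih =>
    intro hle
    rw [pvRunEnd]
    by_cases h : j < body.length
    · rw [dif_pos h]
      rw [List.drop_eq_getElem_cons h]
      by_cases hc : pvProj axis body[j] = c
      · rw [if_pos hc]
        rw [ih (body.length - (j + 1)) (by omega) (j + 1) rfl (by omega)]
        simp only [List.takeWhile_cons, hc, decide_true, if_true, List.length_cons]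
        omega
      · rw [if_neg hc]
        simp [List.takeWhile_cons, hc]
    · rw [dif_neg h]
      have hd : body.drop j = [] := List.drop_eq_nil_of_le (by omega)
      simp [hd]

theorem outer_eq (body : List (Int × Int)) :
    ∀ (k i : Nat) (axis : Bool), body.length - i ≤ k → i ≤ body.length →
      pvOuter body axis i = pvTailC axis (body.drop i) := by
  intro k
  induction k with
  | zero =>
    intro i axis hk hle
    have hi : i = body.length := by omega
    rw [pvOuter, dif_neg (by omega)]
    simp [hi, pvTailC]
  | succ k ihk =>
    intro i axis hk hle
    by_cases h : i < body.length
    · rw [pvOuter, dif_pos h]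
      have hj : pvRunEnd body (!axis) (pvProj (!axis) body[i]) (i + 1)
          = (i + 1) + ((body.drop (i + 1)).takeWhile
              (fun p => decide (pvProj (!axis) p = pvProj (!axis) body[i]))).length :=
        runEnd_eq body (!axis) _ (i + 1) (by omega)
      have htwlen := takeWhile_length_le (body.drop (i + 1))
        (fun p => decide (pvProj (!axis) p = pvProj (!axis) body[i]))
      have hlendrop : (body.drop (i + 1)).length = body.length - (i + 1) := by simp
      have hdropi : body.drop i = body[i] :: body.drop (i + 1) := List.drop_eq_getElem_cons h
      have hslice : PySem.List.slice body (some (i : Int))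
          (some (((i + 1) + ((body.drop (i + 1)).takeWhile
              (fun p => decide (pvProj (!axis) p = pvProj (!axis) body[i]))).length : Nat) : Int))
          = body[i] :: (body.drop (i + 1)).takeWhile
              (fun p => decide (pvProj (!axis) p = pvProj (!axis) body[i])) := by
        rw [PySem.List.slice_natCast]
        rw [show (i + 1) + ((body.drop (i + 1)).takeWhile
              (fun p => decide (pvProj (!axis) p = pvProj (!axis) body[i]))).length - i
            = ((body.drop (i + 1)).takeWhile
              (fun p => decide (pvProj (!axis) p = pvProj (!axis) body[i]))).length + 1 by omega]
        rw [hdropi, List.take_succ_cons, take_takeWhile_length]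
      have hdropj : body.drop ((i + 1) + ((body.drop (i + 1)).takeWhile
              (fun p => decide (pvProj (!axis) p = pvProj (!axis) body[i]))).length)
          = (body.drop (i + 1)).dropWhile
              (fun p => decide (pvProj (!axis) p = pvProj (!axis) body[i])) := by
        rw [← List.drop_drop, drop_takeWhile_length]
      rw [hj, hslice]
      rw [ihk ((i + 1) + ((body.drop (i + 1)).takeWhile
              (fun p => decide (pvProj (!axis) p = pvProj (!axis) body[i]))).length) (!axis)
            (by omega) (by omega)]
      rw [hdropj, hdropi]
      show _ = pvConsume [body[i]] (!axis) body[i] (body.drop (i + 1))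
      rw [consume_run (body.drop (i + 1)) [body[i]] (!axis) body[i]]
      simp
    · rw [pvOuter, dif_neg h]
      have hd : body.drop i = [] := List.drop_eq_nil_of_le (by omega)
      simp [hd, pvTailC]

theorem alt_eq_consume (body : List (Int × Int)) (m : Int × Int) (axis : Bool) :
    pvScan body axis m = pvConsume [] axis m body := by
  unfold pvScan
  have hj : pvRunEnd body axis (pvProj axis m) 0
      = 0 + (body.takeWhile (fun p => decide (pvProj axis p = pvProj axis m))).length := by
    have := runEnd_eq body axis (pvProj axis m) 0 (by omega)
    simpa using this
  have htwlen := takeWhile_length_le body (fun p => decide (pvProj axis p = pvProj axis m))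
  rw [hj]
  have hslice : PySem.List.slice body (some 0)
      (some (((0 + (body.takeWhile (fun p => decide (pvProj axis p = pvProj axis m))).length : Nat)) : Int))
      = body.takeWhile (fun p => decide (pvProj axis p = pvProj axis m)) := by
    rw [show ((0 : Int)) = ((0 : Nat) : Int) by norm_num, PySem.List.slice_natCast]
    simp [take_takeWhile_length]
  rw [hslice]
  rw [outer_eq body body.length _ axis (by omega) (by omega)]
  rw [show (0 + (body.takeWhile (fun p => decide (pvProj axis p = pvProj axis m))).length)
      = (body.takeWhile (fun p => decide (pvProj axis p = pvProj axis m))).length by omega]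
  rw [drop_takeWhile_length]
  rw [consume_run body [] axis m]
  simp

-- ===== VERDICT (by name: the statement is the Claim_ definition above) =====
theorem makeParts_spec : Claim_equal_makeParts := by
  intro m body _ hpre
  unfold Pre_makeParts at hpre
  obtain ⟨hlen, hax⟩ := hpre
  unfold Spec_makeParts makeParts makeParts_alt
  have h1 : PySem.List.pyGet? body 1 = some (body.getD 1 (0, 0)) := by
    rw [show (1 : Int) = ((1 : Nat) : Int) by norm_num, PySem.List.pyGet?_natCast]
    simp [List.getD, List.getElem?_eq_getElem (show 1 < body.length by omega)]
  rw [h1]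
  set p1 := body.getD 1 (0, 0) with hp1
  by_cases hc : p1.1 = m.1
  · simp only [hc, if_pos rfl, if_true]
    have hA := loop_eq_consume body [] [] true m
    simp only [List.nil_append, List.length_nil] at hA
    rw [hA]
    rw [alt_eq_consume body m true]
  · have hc2 : p1.2 = m.2 := by tauto
    simp only [if_neg hc, hc2, if_pos rfl, if_true]
    have hA := loop_eq_consume body [] [] false m
    simp only [List.nil_append, List.length_nil] at hA
    rw [hA]
    rw [alt_eq_consume body m false]
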